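-- pv_equiv track=rewrite | github.com/wespiper/ufr-ds | emergence_engine/sequitur.py | _inline_once
-- ===== SOURCE A (Python) =====
-- from typing import Dict, List, Tuple
--
-- def _inline_once(sequence: List[str], lhs: str, rhs: List[str]) -> List[str]:
--     out: List[str] = []
--     inlined = False
--     for tok in sequence:
--         if not inlined and tok == lhs:
--             out.extend(rhs)
--             inlined = True
--         else:
--             out.append(tok)
--     return out
-- ===== SOURCE B (Python) =====
-- from typing import List
--
-- def _inline_once(sequence: List[str], lhs: str, rhs: List[str]) -> List[str]:
--     try:
--         i = sequence.index(lhs)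
--     except ValueError:
--         return list(sequence)
--     return sequence[:i] + rhs + sequence[i + 1:]
-- ===== Notes on version B (the rewrite author's own statement) =====
-- stated objective: simpler
-- what changed: Replaces the scan-with-boolean-flag append/extend loop by locate-first-match with list.index and one bulk slice-splice construction; the not-found case returns a fresh copy.
import Mathlib
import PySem

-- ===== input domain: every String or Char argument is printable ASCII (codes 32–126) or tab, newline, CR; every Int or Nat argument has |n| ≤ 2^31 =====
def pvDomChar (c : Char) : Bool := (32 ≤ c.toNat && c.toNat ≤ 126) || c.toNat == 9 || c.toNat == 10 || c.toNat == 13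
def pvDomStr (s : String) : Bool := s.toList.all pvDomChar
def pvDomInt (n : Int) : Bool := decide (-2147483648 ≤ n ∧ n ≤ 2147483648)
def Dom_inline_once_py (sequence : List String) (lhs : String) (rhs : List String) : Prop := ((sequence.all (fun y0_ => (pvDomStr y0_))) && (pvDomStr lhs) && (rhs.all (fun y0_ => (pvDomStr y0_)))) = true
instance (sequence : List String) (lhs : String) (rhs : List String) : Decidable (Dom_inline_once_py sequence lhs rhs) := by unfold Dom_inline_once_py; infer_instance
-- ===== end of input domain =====

-- B replaces A's scan-with-flag append/extend loop by locate-then-splice (index + slices); objective: simpler.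

-- ===== PORT A =====
-- the loop carries (out, inlined) exactly as A does
def inline_once_py (sequence : List String) (lhs : String) (rhs : List String) : List String :=
  (sequence.foldl
    (fun (st : List String × Bool) tok =>
      if !st.2 && tok == lhs then (st.1 ++ rhs, true) else (st.1 ++ [tok], st.2))
    ([], false)).1

-- ===== PORT B =====
-- sequence.index(lhs) → PySem.List.index?; the two slices are PySem.List.slice (exact on the
-- nonnegative bounds used here); the except-branch returns the list unchanged (a fresh copy in Python).
def inline_once_py_alt (sequence : List String) (lhs : String) (rhs : List String) : List String :=
  match PySem.List.index? sequence lhs with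
  | none => sequence
  | some i =>
      PySem.List.slice sequence none (some (i : Int)) ++ rhs ++
      PySem.List.slice sequence (some ((i : Int) + 1)) none

-- ===== PRECONDITION & SPEC =====
def Spec_inline_once_py (sequence : List String) (lhs : String) (rhs : List String) (out : List String) : Prop := out = inline_once_py_alt sequence lhs rhs
instance (sequence : List String) (lhs : String) (rhs : List String) (out : List String) : Decidable (Spec_inline_once_py sequence lhs rhs out) := by unfold Spec_inline_once_py; infer_instance

-- ===== CLAIM (what is proved, stated in full; the proofs are below) =====
def Claim_equal_inline_once_py : Prop := ∀ (sequence : List String) (lhs : String) (rhs : List String), Dom_inline_once_py sequence lhs rhs → Spec_inline_once_py sequence lhs rhs (inline_once_py sequence lhs rhs)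

-- ===== LEMMAS AND PROOFS =====

-- recursive characterisation both ports are reduced to
def spliceRec (sequence : List String) (lhs : String) (rhs : List String) : List String :=
  match sequence with
  | [] => []
  | x :: xs => if x = lhs then rhs ++ xs else x :: spliceRec xs lhs rhs

theorem foldl_flag_true (sequence : List String) (lhs : String) (rhs : List String)
    (acc : List String) :
    (sequence.foldl
      (fun (st : List String × Bool) tok =>
        if !st.2 && tok == lhs then (st.1 ++ rhs, true) else (st.1 ++ [tok], st.2))
      (acc, true)) = (acc ++ sequence, true) := by
  induction sequence generalizing acc with
  | nil => simp
  | cons x xs ih =>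
    rw [List.foldl_cons]
    simp only [Bool.not_true, Bool.false_and, Bool.false_eq_true, if_false]
    rw [ih]; simp

theorem foldl_flag_false (sequence : List String) (lhs : String) (rhs : List String)
    (acc : List String) :
    (sequence.foldl
      (fun (st : List String × Bool) tok =>
        if !st.2 && tok == lhs then (st.1 ++ rhs, true) else (st.1 ++ [tok], st.2))
      (acc, false)).1 = acc ++ spliceRec sequence lhs rhs := by
  induction sequence generalizing acc with
  | nil => simp [spliceRec]
  | cons x xs ih =>
    rw [List.foldl_cons]
    simp only [Bool.not_false, Bool.true_and]
    by_cases hx : x = lhs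
    · rw [if_pos (by simp [hx]), foldl_flag_true]
      simp [spliceRec, hx]
    · rw [if_neg (by simp [hx]), ih]
      simp [spliceRec, hx]

theorem altEqSplice (sequence : List String) (lhs : String) (rhs : List String) :
    inline_once_py_alt sequence lhs rhs = spliceRec sequence lhs rhs := by
  induction sequence with
  | nil => simp [inline_once_py_alt, PySem.List.index?, spliceRec]
  | cons x xs ih =>
    by_cases hx : x = lhs
    · subst hx
      rw [inline_once_py_alt, PySem.List.index?_cons_self]
      dsimp only
      rw [PySem.List.slice_to_natCast]
      have h01 : ((0 : Nat) : Int) + 1 = ((1 : Nat) : Int) := by norm_num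
      rw [h01, PySem.List.slice_from_natCast]
      simp [spliceRec]
    · rw [inline_once_py_alt, PySem.List.index?_cons_of_ne xs hx]
      rw [inline_once_py_alt] at ih
      cases h : PySem.List.index? xs lhs with
      | none =>
        simp only [h, Option.map_none] at ih ⊢
        rw [spliceRec, if_neg hx, ← ih]
      | some i =>
        simp only [h, Option.map_some] at ih ⊢
        have h1 : ((i + 1 : Nat) : Int) = ((i : Nat) : Int) + 1 := by push_cast; ring
        have h2 : ((i + 2 : Nat) : Int) = ((i + 1 : Nat) : Int) + 1 := by push_cast; ring
        rw [← h2, PySem.List.slice_to_natCast, PySem.List.slice_from_natCast]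
        rw [← h1] at ih
        rw [PySem.List.slice_to_natCast, PySem.List.slice_from_natCast] at ih
        simp [spliceRec, hx, List.take_succ_cons, List.drop_succ_cons, ← ih]

-- ===== VERDICT (by name: the statement is the Claim_ definition above) =====
theorem inline_once_py_spec : Claim_equal_inline_once_py := by
  intro sequence lhs rhs _
  unfold Spec_inline_once_py inline_once_py
  rw [altEqSplice, foldl_flag_false]
  simp
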